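-- pv_equiv track=rewrite | github.com/CupCupRay/TypeFSL | Dataset_collection/preprocessing/label.py | identify_common
-- ===== SOURCE A (Python) =====
-- prim_type = ["long long", "long double", "long", "double", "float", "char", "short", "int"] # ,
--
-- def identify_common(type_name):
--     if type_name == "void*":
--         return True
--     type_name = type_name.strip('*')
--     for token in prim_type:
--         if token == type_name or 'unsigned ' + token == type_name:
--             return True
--     return False
-- ===== SOURCE B (Python) =====
-- def identify_common(type_name):
--     if type_name == "void*":
--         return True
--     # single left-to-right character pass: tokenize on single spaces
--     words, cur = [], ""
--     for ch in type_name.strip('*'):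
--         if ch == ' ':
--             words.append(cur)
--             cur = ""
--         else:
--             cur += ch
--     words.append(cur)
--     # grammar: optional "unsigned" qualifier, then a one- or two-word primitive
--     if words[:1] == ["unsigned"]:
--         words = words[1:]
--     if len(words) == 2:
--         return words[0] == "long" and words[1] in ("long", "double")
--     return len(words) == 1 and words[0] in ("long", "double", "float", "char", "short", "int")
-- ===== Notes on version B (the rewrite author's own statement) =====
-- stated objective: alternative
-- what changed: Replaces A's scan over the 8 primitive names with a double whole-string comparison per name by a single character pass that tokenizes the stripped name on spaces and then matches the token list against a small grammar (optional 'unsigned' qualifier, then a one- or two-word primitive).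
import Mathlib
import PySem

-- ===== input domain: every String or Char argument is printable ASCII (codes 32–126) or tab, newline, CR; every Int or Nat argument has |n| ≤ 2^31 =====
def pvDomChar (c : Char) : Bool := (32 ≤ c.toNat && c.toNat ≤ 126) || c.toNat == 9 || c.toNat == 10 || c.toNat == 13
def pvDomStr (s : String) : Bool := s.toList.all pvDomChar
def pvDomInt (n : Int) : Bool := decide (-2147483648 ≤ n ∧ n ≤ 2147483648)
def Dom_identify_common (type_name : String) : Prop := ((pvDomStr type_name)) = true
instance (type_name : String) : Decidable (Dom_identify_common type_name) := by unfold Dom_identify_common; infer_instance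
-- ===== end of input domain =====

-- B replaces A's scan over the 8 primitive names (each compared whole-string, bare and
-- 'unsigned '-prefixed) by one character pass tokenizing the stripped name on spaces
-- followed by a fixed token-grammar check (objective: alternative).

-- ===== PORT A =====
def prim_type : List String := ["long long", "long double", "long", "double", "float", "char", "short", "int"]

def identifyLoop (type_name : String) : List String → Bool
  | [] => false
  | token :: rest =>
      if token == type_name || ("unsigned " ++ token) == type_name then true
      else identifyLoop type_name rest

def identify_common (type_name : String) : Bool :=
  if type_name == "void*" then true
  else identifyLoop (PySem.Str.stripChars type_name "*") prim_type

-- ===== PORT B =====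
-- tokens are represented as List Char (Python's str, via String.toList)
-- the loop  "for ch: if ch==' ': words.append(cur); cur='' else: cur += ch"  as a foldl over (words, cur)
def wordsOf (u : List Char) : List (List Char) :=
  let p := u.foldl (fun (st : List (List Char) × List Char) ch =>
    if ch == ' ' then (st.1 ++ [st.2], []) else (st.1, st.2 ++ [ch])) ([], [])
  p.1 ++ [p.2]

def checkB (w0 : List (List Char)) : Bool :=
  let w := if w0.take 1 == ["unsigned".toList] then w0.drop 1 else w0
  if w.length == 2 then
    w.getD 0 [] == "long".toList && (w.getD 1 [] == "long".toList || w.getD 1 [] == "double".toList)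
  else
    w.length == 1 && (w.getD 0 [] == "long".toList || w.getD 0 [] == "double".toList ||
      w.getD 0 [] == "float".toList || w.getD 0 [] == "char".toList ||
      w.getD 0 [] == "short".toList || w.getD 0 [] == "int".toList)

def identify_common_alt (type_name : String) : Bool :=
  if type_name == "void*" then true
  else checkB (wordsOf (PySem.Str.stripChars type_name "*").toList)

-- ===== PRECONDITION & SPEC =====
def Spec_identify_common (type_name : String) (out : Bool) : Prop := out = identify_common_alt type_name
instance (type_name : String) (out : Bool) : Decidable (Spec_identify_common type_name out) := by unfold Spec_identify_common; infer_instance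

-- ===== CLAIM (what is proved, stated in full; the proofs are below) =====
def Claim_equal_identify_common : Prop := ∀ (type_name : String), Dom_identify_common type_name → Spec_identify_common type_name (identify_common type_name)

-- ===== LEMMAS AND PROOFS =====

-- join of a word list with single spaces (left inverse of wordsOf)
def joinSp : List (List Char) → List Char
  | [] => []
  | [w] => w
  | w :: ws => w ++ ' ' :: joinSp ws

lemma joinSp_append_last (ws : List (List Char)) (a b : List Char) :
    joinSp (ws ++ [a ++ b]) = joinSp (ws ++ [a]) ++ b := by
  induction ws with
  | nil => simp [joinSp]
  | cons w ws ih =>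
      cases ws with
      | nil => simp [joinSp]
      | cons w' ws' => simp [joinSp] at ih ⊢; simp [ih]

lemma joinSp_snoc_nil (ws : List (List Char)) (a : List Char) :
    joinSp (ws ++ [a] ++ [[]]) = joinSp (ws ++ [a]) ++ [' '] := by
  induction ws with
  | nil => simp [joinSp]
  | cons w ws ih =>
      cases ws with
      | nil => simp [joinSp]
      | cons w' ws' => simp [joinSp] at ih ⊢; simp [ih]

lemma foldl_join (u : List Char) : ∀ (ws : List (List Char)) (cur : List Char),
    joinSp ((u.foldl (fun (st : List (List Char) × List Char) ch =>
      if ch == ' ' then (st.1 ++ [st.2], []) else (st.1, st.2 ++ [ch])) (ws, cur)).1 ++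
      [(u.foldl (fun (st : List (List Char) × List Char) ch =>
      if ch == ' ' then (st.1 ++ [st.2], []) else (st.1, st.2 ++ [ch])) (ws, cur)).2])
    = joinSp (ws ++ [cur]) ++ u := by
  induction u with
  | nil => intro ws cur; simp
  | cons c rest ih =>
      intro ws cur
      by_cases h : c = ' '
      · subst h
        simp only [List.foldl_cons, beq_self_eq_true, if_true]
        rw [ih (ws ++ [cur]) []]
        rw [joinSp_snoc_nil]
        simp
      · have hb : (c == ' ') = false := by simp [h]
        simp only [List.foldl_cons, hb, Bool.false_eq_true, if_false]
        rw [ih ws (cur ++ [c])]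
        rw [joinSp_append_last]
        simp

lemma joinSp_wordsOf (u : List Char) : joinSp (wordsOf u) = u := by
  have := foldl_join u [] []
  simpa [wordsOf, joinSp] using this

-- bridge: a whole-string comparison against a fixed name equals a token-list comparison
lemma key (lit : String) (p : List (List Char))
    (h1 : wordsOf lit.toList = p) (h2 : joinSp p = lit.toList) (v : String) :
    (lit == v) = (wordsOf v.toList == p) := by
  rw [Bool.eq_iff_iff]
  simp only [beq_iff_eq]
  constructor
  · rintro rfl; exact h1
  · intro hw
    have : v.toList = lit.toList := by rw [← h2, ← hw, joinSp_wordsOf]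
    exact (String.toList_injective this).symm

-- the A-side disjunction of 16 token-list comparisons equals B's grammar check
lemma taut (w : List (List Char)) :
    ((w == ["long".toList, "long".toList] || w == ["unsigned".toList, "long".toList, "long".toList]) ||
     ((w == ["long".toList, "double".toList] || w == ["unsigned".toList, "long".toList, "double".toList]) ||
      ((w == ["long".toList] || w == ["unsigned".toList, "long".toList]) ||
       ((w == ["double".toList] || w == ["unsigned".toList, "double".toList]) ||
        ((w == ["float".toList] || w == ["unsigned".toList, "float".toList]) ||
         ((w == ["char".toList] || w == ["unsigned".toList, "char".toList]) ||
          ((w == ["short".toList] || w == ["unsigned".toList, "short".toList]) ||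
           ((w == ["int".toList] || w == ["unsigned".toList, "int".toList]) || false))))))))
    = checkB w := by
  rcases w with _ | ⟨a, _ | ⟨b, _ | ⟨c, _ | ⟨d, rest⟩⟩⟩⟩
  · decide
  · by_cases ha : a = ['u','n','s','i','g','n','e','d'] <;>
      simp [checkB, ha, Bool.or_assoc, Bool.and_or_distrib_left]
  · by_cases ha : a = ['u','n','s','i','g','n','e','d']
    · simp [checkB, ha, Bool.or_assoc, Bool.and_or_distrib_left]
    · have hb : (a == ['u','n','s','i','g','n','e','d']) = false := beq_eq_false_iff_ne.mpr ha
      simp [checkB, hb, Bool.and_or_distrib_left]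
  · by_cases ha : a = ['u','n','s','i','g','n','e','d'] <;>
      simp [checkB, ha, Bool.or_assoc, Bool.and_or_distrib_left]
  · by_cases ha : a = ['u','n','s','i','g','n','e','d'] <;>
      simp [checkB, ha, Bool.or_assoc, Bool.and_or_distrib_left]

lemma main_eq (v : String) : identifyLoop v prim_type = checkB (wordsOf v.toList) := by
  simp only [prim_type, identifyLoop, Bool.if_true_left, Bool.decide_eq_true]
  rw [key "long long" ["long".toList, "long".toList] (by decide) (by decide) v,
    key ("unsigned " ++ "long long") ["unsigned".toList, "long".toList, "long".toList] (by decide) (by decide) v,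
    key "long double" ["long".toList, "double".toList] (by decide) (by decide) v,
    key ("unsigned " ++ "long double") ["unsigned".toList, "long".toList, "double".toList] (by decide) (by decide) v,
    key "long" ["long".toList] (by decide) (by decide) v,
    key ("unsigned " ++ "long") ["unsigned".toList, "long".toList] (by decide) (by decide) v,
    key "double" ["double".toList] (by decide) (by decide) v,
    key ("unsigned " ++ "double") ["unsigned".toList, "double".toList] (by decide) (by decide) v,
    key "float" ["float".toList] (by decide) (by decide) v,
    key ("unsigned " ++ "float") ["unsigned".toList, "float".toList] (by decide) (by decide) v,
    key "char" ["char".toList] (by decide) (by decide) v,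
    key ("unsigned " ++ "char") ["unsigned".toList, "char".toList] (by decide) (by decide) v,
    key "short" ["short".toList] (by decide) (by decide) v,
    key ("unsigned " ++ "short") ["unsigned".toList, "short".toList] (by decide) (by decide) v,
    key "int" ["int".toList] (by decide) (by decide) v,
    key ("unsigned " ++ "int") ["unsigned".toList, "int".toList] (by decide) (by decide) v]
  exact taut _

-- ===== VERDICT (by name: the statement is the Claim_ definition above) =====
theorem identify_common_spec : Claim_equal_identify_common := by
  intro t _
  unfold Spec_identify_common identify_common identify_common_alt
  split
  · rfl
  · exact main_eq _
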